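-- pv_equiv track=rewrite | github.com/aecwells/hwautomation | src/hwautomation/hardware/discovery.py | _parse_hpe_controller_info
-- ===== SOURCE A (Python) =====
-- from typing import Any, Dict, List, Optional, Tuple
--
-- def _parse_hpe_controller_info(output: str) -> Dict[str, Any]:
--     """Parse HPE controller information output."""
--     info = {}
--     controllers = []
--
--     current_controller = None
--
--     for line in output.split("\n"):
--         line = line.strip()
--
--         if "Smart Array" in line:
--             if current_controller:
--                 controllers.append(current_controller)
--             current_controller = {"model": line}
--         elif current_controller and ":" in line:
--             key, value = line.split(":", 1)
--             key = key.strip().lower()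
--             value = value.strip()
--
--             if "serial number" in key:
--                 current_controller["serial"] = value
--             elif "firmware version" in key:
--                 current_controller["firmware"] = value
--
--     if current_controller:
--         controllers.append(current_controller)
--
--     if controllers:
--         info["storage_controllers"] = controllers
--
--     return info
-- ===== SOURCE B (Python) =====
-- def _parse_hpe_controller_info(output: str):
--     """Parse HPE controller information output (group-then-map decomposition)."""
--     lines = [ln.strip() for ln in output.split("\n")]
--     blocks = []
--     for ln in lines:
--         if "Smart Array" in ln:
--             blocks.append([ln])
--         elif blocks:
--             blocks[-1].append(ln)
--     controllers = [_parse_block(b) for b in blocks]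
--     return {"storage_controllers": controllers} if controllers else {}
--
--
-- def _parse_block(block):
--     ctrl = {"model": block[0]}
--     for ln in block[1:]:
--         if ":" in ln:
--             key, value = ln.split(":", 1)
--             key = key.strip().lower()
--             value = value.strip()
--             if "serial number" in key:
--                 ctrl["serial"] = value
--             elif "firmware version" in key:
--                 ctrl["firmware"] = value
--     return ctrl
-- ===== Notes on version B (the rewrite author's own statement) =====
-- stated objective: alternative
-- what changed: A's single accumulating pass with a mutable running-controller dict is re-decomposed into two phases: first group the stripped lines into per-controller blocks (a new block per header-marker line, lines before the first marker discarded), then map an independent block parser over the blocks.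
import Mathlib
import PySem

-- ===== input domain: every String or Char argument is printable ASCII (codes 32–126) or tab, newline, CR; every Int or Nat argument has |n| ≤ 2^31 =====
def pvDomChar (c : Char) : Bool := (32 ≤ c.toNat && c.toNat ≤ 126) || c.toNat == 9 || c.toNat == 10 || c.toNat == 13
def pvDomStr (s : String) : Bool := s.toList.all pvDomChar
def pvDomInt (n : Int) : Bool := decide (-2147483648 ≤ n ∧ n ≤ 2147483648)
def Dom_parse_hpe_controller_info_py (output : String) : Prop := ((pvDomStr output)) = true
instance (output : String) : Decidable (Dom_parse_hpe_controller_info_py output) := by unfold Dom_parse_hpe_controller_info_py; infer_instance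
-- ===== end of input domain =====

-- B re-decomposes A's single accumulating pass as group-lines-into-blocks then map a block parser; same return value, 'alternative' objective.

-- ===== PORT A =====
-- A's loop step: strip the line, start a new controller on a 'Smart Array' header
-- (flushing the current one), else update the current controller from a 'key: value' line.
def pvAStep (st : List (List (String × String)) × Option (PySem.Dict String String))
    (rawLine : String) : List (List (String × String)) × Option (PySem.Dict String String) :=
  let line := PySem.Str.strip rawLine
  if PySem.Str.isIn "Smart Array" line then
    match st.2 with
    | some d => (if d.items.isEmpty then st.1 else st.1 ++ [d.items],
                 some (PySem.Dict.insert PySem.Dict.empty "model" line))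
    | none => (st.1, some (PySem.Dict.insert PySem.Dict.empty "model" line))
  else
    match st.2 with
    | some d =>
      if !d.items.isEmpty && PySem.Str.isIn ":" line then
        match PySem.Str.splitMax? line ":" 1 with
        | some (k :: v :: _) =>
          let key := PySem.Str.lower (PySem.Str.strip k)
          let value := PySem.Str.strip v
          (st.1, some (if PySem.Str.isIn "serial number" key then PySem.Dict.insert d "serial" value
                       else if PySem.Str.isIn "firmware version" key then PySem.Dict.insert d "firmware" value
                       else d))
        | _ => (st.1, some d)
      else st
    | none => st

def parse_hpe_controller_info_py (output : String) : List (String × List (List (String × String))) :=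
  let st := ((PySem.Str.split? output "\n").getD []).foldl pvAStep ([], none)
  let controllers := match st.2 with
    | some d => if d.items.isEmpty then st.1 else st.1 ++ [d.items]
    | none => st.1
  if controllers.isEmpty then [] else [("storage_controllers", controllers)]

-- ===== PORT B =====
-- Source B's per-line controller update (the body of _parse_block's loop).
def pvParseLine (d : PySem.Dict String String) (ln : String) : PySem.Dict String String :=
  if PySem.Str.isIn ":" ln then
    match PySem.Str.splitMax? ln ":" 1 with
    | some (k :: v :: _) =>
      let key := PySem.Str.lower (PySem.Str.strip k)
      let value := PySem.Str.strip v
      if PySem.Str.isIn "serial number" key then PySem.Dict.insert d "serial" value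
      else if PySem.Str.isIn "firmware version" key then PySem.Dict.insert d "firmware" value
      else d
    | _ => d
  else d

-- Source B's _parse_block: header line gives {'model': header}, the rest update it.
def pvParseBlock (block : List String) : List (String × String) :=
  match block with
  | [] => []
  | h :: rest => (rest.foldl pvParseLine (PySem.Dict.insert PySem.Dict.empty "model" h)).items

-- Source B's grouping step: a 'Smart Array' line opens a new block, other lines are
-- appended to the last block (discarded when no block is open yet).
def pvAddLine (blocks : List (List String)) (ln : String) : List (List String) :=
  if PySem.Str.isIn "Smart Array" ln then blocks ++ [[ln]]
  else if !blocks.isEmpty then blocks.dropLast ++ [blocks.getLastD [] ++ [ln]]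
  else blocks

def parse_hpe_controller_info_py_alt (output : String) : List (String × List (List (String × String))) :=
  let lines := ((PySem.Str.split? output "\n").getD []).map PySem.Str.strip
  let blocks := lines.foldl pvAddLine []
  let controllers := blocks.map pvParseBlock
  if controllers.isEmpty then [] else [("storage_controllers", controllers)]

-- ===== PRECONDITION & SPEC =====
def Spec_parse_hpe_controller_info_py (output : String) (out : List (String × List (List (String × String)))) : Prop := out = parse_hpe_controller_info_py_alt output
instance (output : String) (out : List (String × List (List (String × String)))) : Decidable (Spec_parse_hpe_controller_info_py output out) := by unfold Spec_parse_hpe_controller_info_py; infer_instance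

-- ===== CLAIM (what is proved, stated in full; the proofs are below) =====
def Claim_equal_parse_hpe_controller_info_py : Prop := ∀ (output : String), Dom_parse_hpe_controller_info_py output → Spec_parse_hpe_controller_info_py output (parse_hpe_controller_info_py output)

-- ===== LEMMAS AND PROOFS =====

-- A's step on an already-stripped line.
def pvAStep' (st : List (List (String × String)) × Option (PySem.Dict String String))
    (line : String) : List (List (String × String)) × Option (PySem.Dict String String) :=
  if PySem.Str.isIn "Smart Array" line then
    match st.2 with
    | some d => (if d.items.isEmpty then st.1 else st.1 ++ [d.items],
                 some (PySem.Dict.insert PySem.Dict.empty "model" line))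
    | none => (st.1, some (PySem.Dict.insert PySem.Dict.empty "model" line))
  else
    match st.2 with
    | some d =>
      if !d.items.isEmpty && PySem.Str.isIn ":" line then
        match PySem.Str.splitMax? line ":" 1 with
        | some (k :: v :: _) =>
          let key := PySem.Str.lower (PySem.Str.strip k)
          let value := PySem.Str.strip v
          (st.1, some (if PySem.Str.isIn "serial number" key then PySem.Dict.insert d "serial" value
                       else if PySem.Str.isIn "firmware version" key then PySem.Dict.insert d "firmware" value
                       else d))
        | _ => (st.1, some d)
      else st
    | none => st

def pvFinalize (st : List (List (String × String)) × Option (PySem.Dict String String)) :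
    List (List (String × String)) :=
  match st.2 with
  | some d => if d.items.isEmpty then st.1 else st.1 ++ [d.items]
  | none => st.1

-- the shared spine: parsed controllers produced from an open controller d and the remaining lines
def pvG (d : PySem.Dict String String) : List String → List (List (String × String))
  | [] => [d.items]
  | l :: ls =>
    if PySem.Str.isIn "Smart Array" l then
      d.items :: pvG (PySem.Dict.insert PySem.Dict.empty "model" l) ls
    else pvG (pvParseLine d l) ls

lemma pvG_cons (d : PySem.Dict String String) (l : String) (ls : List String) :
    pvG d (l :: ls) = if PySem.Str.isIn "Smart Array" l = true then
      d.items :: pvG (PySem.Dict.insert PySem.Dict.empty "model" l) ls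
    else pvG (pvParseLine d l) ls := rfl

def pvBlockDict (b : List String) : PySem.Dict String String :=
  match b with
  | [] => PySem.Dict.empty
  | h :: rest => rest.foldl pvParseLine (PySem.Dict.insert PySem.Dict.empty "model" h)

lemma pvInsert_items_ne_nil (d : PySem.Dict String String) (k v : String) :
    (PySem.Dict.insert d k v).items ≠ [] := by
  rw [PySem.Dict.items_insert]
  split_ifs with h
  · simp only [ne_eq, List.map_eq_nil_iff]
    intro hnil
    rw [PySem.Dict.contains_iff_mem_keys] at h
    simp only [PySem.Dict.keys, hnil, List.map_nil] at h
    exact (List.not_mem_nil) h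
  · simp

lemma pvParseLine_items_ne_nil (d : PySem.Dict String String) (l : String) (h : d.items ≠ []) :
    (pvParseLine d l).items ≠ [] := by
  unfold pvParseLine
  by_cases hc : PySem.Str.isIn ":" l = true
  · rw [if_pos hc]
    cases hs : PySem.Str.splitMax? l ":" 1 with
    | none => exact h
    | some parts =>
      cases parts with
      | nil => exact h
      | cons k rest =>
        cases rest with
        | nil => exact h
        | cons v tail =>
          dsimp only
          split_ifs <;> first | exact pvInsert_items_ne_nil _ _ _ | exact h
  · rw [if_neg hc]; exact h

lemma pvAStep'_nonheader (cs : List (List (String × String))) (d : PySem.Dict String String)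
    (l : String) (hh : ¬ PySem.Str.isIn "Smart Array" l = true) (hd : d.items ≠ []) :
    pvAStep' (cs, some d) l = (cs, some (pvParseLine d l)) := by
  have hne : d.items.isEmpty = false := List.isEmpty_eq_false_iff.mpr hd
  unfold pvAStep' pvParseLine
  rw [if_neg hh]
  dsimp only
  rw [hne]
  simp only [Bool.not_false, Bool.true_and]
  by_cases hc : PySem.Str.isIn ":" l = true
  · rw [if_pos hc, if_pos hc]
    cases hs : PySem.Str.splitMax? l ":" 1 with
    | none => rfl
    | some parts =>
      cases parts with
      | nil => rfl
      | cons k rest =>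
        cases rest with
        | nil => rfl
        | cons v tail => rfl
  · rw [if_neg hc, if_neg hc]

lemma pvL1 (ls : List String) (cs : List (List (String × String))) (d : PySem.Dict String String)
    (hd : d.items ≠ []) :
    pvFinalize (ls.foldl pvAStep' (cs, some d)) = cs ++ pvG d ls := by
  induction ls generalizing cs d with
  | nil => simp [pvFinalize, pvG, List.isEmpty_eq_false_iff.mpr hd]
  | cons l ls ih =>
    by_cases hh : PySem.Str.isIn "Smart Array" l = true
    · have hstep : pvAStep' (cs, some d) l =
        (cs ++ [d.items], some (PySem.Dict.insert PySem.Dict.empty "model" l)) := by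
        unfold pvAStep'
        rw [if_pos hh]
        simp [List.isEmpty_eq_false_iff.mpr hd]
      simp only [List.foldl_cons, hstep, pvG, hh, if_true]
      rw [ih _ _ (pvInsert_items_ne_nil _ _ _)]
      simp
    · simp only [List.foldl_cons, pvAStep'_nonheader cs d l hh hd, pvG, hh]
      exact ih _ _ (pvParseLine_items_ne_nil d l hd)

lemma pvBlockDict_append (b : List String) (hb : b ≠ []) (l : String) :
    pvBlockDict (b ++ [l]) = pvParseLine (pvBlockDict b) l := by
  cases b with
  | nil => exact absurd rfl hb
  | cons h rest => simp [pvBlockDict, List.foldl_append]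

lemma pvParseBlock_eq (b : List String) (hb : b ≠ []) :
    pvParseBlock b = (pvBlockDict b).items := by
  cases b with
  | nil => exact absurd rfl hb
  | cons h rest => rfl

lemma pvL3 (ls : List String) (bs : List (List String)) (b : List String) (hb : b ≠ []) :
    ((ls.foldl pvAddLine (bs ++ [b])).map pvParseBlock) =
      bs.map pvParseBlock ++ pvG (pvBlockDict b) ls := by
  induction ls generalizing bs b with
  | nil =>
    simp [pvG, pvParseBlock_eq b hb]
  | cons l ls ih =>
    by_cases hh : PySem.Str.isIn "Smart Array" l = true
    · have hstep : pvAddLine (bs ++ [b]) l = (bs ++ [b]) ++ [[l]] := by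
        unfold pvAddLine; rw [if_pos hh]
      simp only [List.foldl_cons, hstep, pvG, hh, if_true]
      rw [ih (bs ++ [b]) [l] (by simp)]
      simp [pvParseBlock_eq b hb, pvBlockDict]
    · have hstep : pvAddLine (bs ++ [b]) l = bs ++ [b ++ [l]] := by
        unfold pvAddLine
        rw [if_neg hh, if_pos (by simp : (!(bs ++ [b]).isEmpty) = true)]
        simp
      simp only [List.foldl_cons, hstep]
      rw [ih bs (b ++ [l]) (by simp)]
      rw [pvBlockDict_append b hb l, pvG_cons, if_neg hh]

lemma pvL2 (ls : List String) :
    pvFinalize (ls.foldl pvAStep' ([], none)) = (ls.foldl pvAddLine []).map pvParseBlock := by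
  induction ls with
  | nil => rfl
  | cons l ls ih =>
    by_cases hh : PySem.Str.isIn "Smart Array" l = true
    · have h1 : pvAStep' ([], none) l =
        ([], some (PySem.Dict.insert PySem.Dict.empty "model" l)) := by
        unfold pvAStep'; rw [if_pos hh]
      have h2 : pvAddLine [] l = [] ++ [[l]] := by
        unfold pvAddLine; rw [if_pos hh]
      simp only [List.foldl_cons, h1, h2]
      rw [pvL1 ls [] _ (pvInsert_items_ne_nil _ _ _)]
      rw [pvL3 ls [] [l] (List.cons_ne_nil _ _)]
      rfl
    · have h1 : pvAStep' ([], none) l = ([], none) := by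
        unfold pvAStep'; rw [if_neg hh]
      have h2 : pvAddLine [] l = [] := by
        unfold pvAddLine; rw [if_neg hh]; rfl
      simp only [List.foldl_cons, h1, h2]
      exact ih

lemma pvFold_eq (ls : List String) :
    ls.foldl pvAStep ([], none) = (ls.map PySem.Str.strip).foldl pvAStep' ([], none) := by
  rw [List.foldl_map]; rfl

-- ===== VERDICT (by name: the statement is the Claim_ definition above) =====
theorem parse_hpe_controller_info_py_spec : Claim_equal_parse_hpe_controller_info_py := by
  intro output _
  unfold Spec_parse_hpe_controller_info_py
  dsimp only [parse_hpe_controller_info_py, parse_hpe_controller_info_py_alt]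
  rw [pvFold_eq, ← pvL2]
  rfl
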